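-- pv_equiv track=rewrite | github.com/sumithastir/Data-structure | day8-special-subsequences-ag.py | solve
-- ===== SOURCE A (Python) =====
-- def solve(A):
--     m = 1000000007
--     count = 0
--     ans = 0
--     N = len(A)
--     for i in range(0, N):
--         if A[i] == 'A':
--             count += 1
--         elif A[i] == 'G':
--             ans = ans + count
--     return ans % m
-- ===== SOURCE B (Python) =====
-- def solve(A):
--     # pass 1: prefix table of A-counts before each index
--     pref = []
--     c = 0
--     for ch in A:
--         pref.append(c)
--         if ch == 'A':
--             c += 1
--     # pass 2: sum the prefix counts at G positions
--     total = 0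
--     for p, ch in zip(pref, A):
--         if ch == 'G':
--             total += p
--     return total % 1000000007
-- ===== Notes on version B (the rewrite author's own statement) =====
-- stated objective: alternative
-- what changed: Replaces the single fused count/ans accumulator loop by two passes: one building a prefix table of 'A'-counts, and a second summing the table entries at 'G' positions.
import Mathlib
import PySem

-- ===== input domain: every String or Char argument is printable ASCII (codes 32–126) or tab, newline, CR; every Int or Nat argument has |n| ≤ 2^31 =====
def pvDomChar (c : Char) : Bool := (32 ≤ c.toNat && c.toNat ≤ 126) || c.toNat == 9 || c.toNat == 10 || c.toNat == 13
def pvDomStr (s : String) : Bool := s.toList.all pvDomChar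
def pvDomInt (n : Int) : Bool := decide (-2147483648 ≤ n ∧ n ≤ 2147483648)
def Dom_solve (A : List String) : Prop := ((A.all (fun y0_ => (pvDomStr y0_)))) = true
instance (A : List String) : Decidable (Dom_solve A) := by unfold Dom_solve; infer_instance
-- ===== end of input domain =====

-- B replaces A's fused count/ans accumulator loop by two passes: a prefix table of 'A'-counts, then a sum of table entries at 'G' positions (objective: alternative).

-- ===== PORT A =====
-- A's single loop carrying (count, ans); returns ans % 1000000007.
def solve (A : List String) : Int :=
  let st := A.foldl (fun (s : Int × Int) ch =>
      if ch = "A" then (s.1 + 1, s.2)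
      else if ch = "G" then (s.1, s.2 + s.1)
      else s) (0, 0)
  st.2 % 1000000007

-- ===== PORT B =====
-- pass 1: build pref (prefix 'A'-counts) with a fold carrying (pref, c); pass 2: sum over zip pref A at 'G' positions.
def solve_alt (A : List String) : Int :=
  let pref := (A.foldl (fun (st : List Int × Int) ch =>
      (st.1 ++ [st.2], if ch = "A" then st.2 + 1 else st.2)) ([], 0)).1
  let total := (pref.zip A).foldl (fun t pc => if pc.2 = "G" then t + pc.1 else t) 0
  total % 1000000007

-- ===== PRECONDITION & SPEC =====
def Spec_solve (A : List String) (out : Int) : Prop := out = solve_alt A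
instance (A : List String) (out : Int) : Decidable (Spec_solve A out) := by unfold Spec_solve; infer_instance

-- ===== CLAIM (what is proved, stated in full; the proofs are below) =====
def Claim_equal_solve : Prop := ∀ (A : List String), Dom_solve A → Spec_solve A (solve A)

-- ===== LEMMAS AND PROOFS =====

-- the list of prefix 'A'-counts starting from count c
def cnts (c : Int) : List String → List Int
  | [] => []
  | s :: r => c :: cnts (if s = "A" then c + 1 else c) r

theorem pref_fold_eq (A : List String) : ∀ (acc : List Int) (c : Int),
    (A.foldl (fun (st : List Int × Int) ch =>
      (st.1 ++ [st.2], if ch = "A" then st.2 + 1 else st.2)) (acc, c)).1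
    = acc ++ cnts c A := by
  induction A with
  | nil => intro acc c; simp [cnts]
  | cons s r ih =>
    intro acc c
    simp only [List.foldl_cons, cnts]
    rw [ih]
    simp

theorem main_fold_eq (A : List String) : ∀ (c t : Int),
    (A.foldl (fun (s : Int × Int) ch =>
      if ch = "A" then (s.1 + 1, s.2)
      else if ch = "G" then (s.1, s.2 + s.1)
      else s) (c, t)).2
    = ((cnts c A).zip A).foldl (fun t pc => if pc.2 = "G" then t + pc.1 else t) t := by
  induction A with
  | nil => intro c t; simp
  | cons s r ih =>
    intro c t
    simp only [List.foldl_cons, cnts]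
    by_cases hA : s = "A"
    · have hG : s ≠ "G" := by simp [hA]
      simp [hA, ih]
    · by_cases hG : s = "G"
      · simp [hG, ih]
      · simp [hA, hG, ih]

-- ===== VERDICT (by name: the statement is the Claim_ definition above) =====
theorem solve_spec : Claim_equal_solve := by
  intro A _
  unfold Spec_solve solve solve_alt
  simp only [pref_fold_eq, main_fold_eq, List.nil_append]
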